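-- pv_equiv track=rewrite | github.com/bharatanaik/dna-cryptography | main.py | convert_dna_to_decimal_matrix
-- ===== SOURCE A (Python) =====
-- def convert_dna_to_decimal_matrix(string: str, col: int = 8) -> list[list[int]]:
--     mapping = {
--         "A": 0,
--         "T": 1,
--         "G": 2,
--         "C": 3
--     }
--     n = len(string)
--     row = n // col
--     res = []
--     c = 0
--     for i in range(row):
--         temp = []
--         for j in range(col):
--             temp.append(mapping[string[c]])
--             c += 1
--         res.append(temp)
--     return res
-- ===== SOURCE B (Python) =====
-- def convert_dna_to_decimal_matrix(string: str, col: int = 8) -> list[list[int]]: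
--     mapping = {"A": 0, "T": 1, "G": 2, "C": 3}
--     row = len(string) // col
--     return [[mapping[ch] for ch in string[i * col:(i + 1) * col]] for i in range(row)]
-- ===== Notes on version B (the rewrite author's own statement) =====
-- stated objective: simpler
-- what changed: Replaces A's nested index loops with a running character counter by a per-row decomposition: row i is obtained directly by slicing string[i*col:(i+1)*col] and mapping that chunk, with no mutable counter or append loops.
import Mathlib
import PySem

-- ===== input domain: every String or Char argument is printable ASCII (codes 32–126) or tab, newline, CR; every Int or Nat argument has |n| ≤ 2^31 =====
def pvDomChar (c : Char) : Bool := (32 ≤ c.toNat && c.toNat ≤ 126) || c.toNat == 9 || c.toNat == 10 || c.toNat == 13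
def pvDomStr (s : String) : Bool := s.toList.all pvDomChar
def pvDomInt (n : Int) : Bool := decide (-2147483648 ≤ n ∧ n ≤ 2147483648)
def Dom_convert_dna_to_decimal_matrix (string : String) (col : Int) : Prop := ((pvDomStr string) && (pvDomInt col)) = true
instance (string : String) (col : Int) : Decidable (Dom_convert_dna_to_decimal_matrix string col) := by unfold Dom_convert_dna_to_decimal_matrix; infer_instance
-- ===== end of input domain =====

-- B replaces A's nested index loops with a mutable counter by per-row slicing: row i is
-- mapping applied to the chunk string[i*col:(i+1)*col] (objective: simpler).

-- ===== PORT A =====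
-- Python's mapping dict has 1-character string keys; string[c] is a 1-character string.
-- Both are modeled as Char (exact: Python strings of length 1 compare like their character).
def pvMapping : PySem.Dict Char Int :=
  ((((PySem.Dict.empty).insert 'A' 0).insert 'T' 1).insert 'G' 2).insert 'C' 3

-- literal transliteration of A: nested for-loops over range(row), range(col) with the
-- running counter c; mapping[string[c]] is total here via getD (Pre_ excludes the KeyError
-- and IndexError inputs, so the default is never the value on admitted inputs).
def convert_dna_to_decimal_matrix (string : String) (col : Int) : List (List Int) :=
  let n : Int := PySem.Str.len string
  let row : Int := PySem.Int.floordiv n col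
  let st :=
    (PySem.List.pyRange 0 row 1).foldl
      (fun (st : List (List Int) × Int) _i =>
        let inner :=
          (PySem.List.pyRange 0 col 1).foldl
            (fun (st2 : List Int × Int) _j =>
              (st2.1 ++ [(pvMapping.get? ((PySem.Str.pyGet? string st2.2).getD ' ')).getD 0],
               st2.2 + 1))
            ([], st.2)
        (st.1 ++ [inner.1], inner.2))
      ([], 0)
  st.1

-- ===== PORT B =====
-- literal transliteration of Source B: one comprehension over range(row), each row is the
-- slice string[i*col:(i+1)*col] mapped through the dict.
def convert_dna_to_decimal_matrix_alt (string : String) (col : Int) : List (List Int) :=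
  let row : Int := PySem.Int.floordiv (PySem.Str.len string) col
  (PySem.List.pyRange 0 row 1).map (fun i =>
    (PySem.Str.slice string (some (i * col)) (some ((i + 1) * col))).toList.map
      (fun ch => (pvMapping.get? ch).getD 0))

-- ===== PRECONDITION & SPEC =====
-- Pre_ excludes exactly the inputs where Python A raises: col = 0 (ZeroDivisionError) and,
-- for col > 0, a character other than A/T/G/C among the first (len//col)*col characters (KeyError).
def Pre_convert_dna_to_decimal_matrix (string : String) (col : Int) : Prop :=
  col ≠ 0 ∧
  (0 < col →
    ((string.toList.take (string.toList.length - string.toList.length % col.toNat)).all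
      (fun c => c ∈ (['A', 'T', 'G', 'C'] : List Char))) = true)
instance (string : String) (col : Int) : Decidable (Pre_convert_dna_to_decimal_matrix string col) := by unfold Pre_convert_dna_to_decimal_matrix; infer_instance

def pvWitness_convert_dna_to_decimal_matrix : String × Int := ("ATGCATGC", 2)

def Spec_convert_dna_to_decimal_matrix (string : String) (col : Int) (out : List (List Int)) : Prop := out = convert_dna_to_decimal_matrix_alt string col
instance (string : String) (col : Int) (out : List (List Int)) : Decidable (Spec_convert_dna_to_decimal_matrix string col out) := by unfold Spec_convert_dna_to_decimal_matrix; infer_instance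

-- ===== CLAIM (what is proved, stated in full; the proofs are below) =====
def Claim_equal_convert_dna_to_decimal_matrix : Prop := ∀ (string : String) (col : Int), Dom_convert_dna_to_decimal_matrix string col → Pre_convert_dna_to_decimal_matrix string col → Spec_convert_dna_to_decimal_matrix string col (convert_dna_to_decimal_matrix string col)

-- ===== LEMMAS AND PROOFS =====

-- value of one mapped character fetched by index, as A's inner loop computes it
def pvG (s : List Char) (i : Int) : Int :=
  (pvMapping.get? ((PySem.List.pyGet? s i).getD ' ')).getD 0

lemma pv_inner_fold (s : String) (k : Nat) (temp : List Int) (c : Int) :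
    (PySem.List.pyRange 0 (k : Int) 1).foldl
      (fun (st2 : List Int × Int) _j =>
        (st2.1 ++ [(pvMapping.get? ((PySem.Str.pyGet? s st2.2).getD ' ')).getD 0],
         st2.2 + 1))
      (temp, c)
    = (temp ++ (PySem.List.pyRange c (c + k) 1).map (pvG s.toList), c + k) := by
  induction k generalizing temp c with
  | zero => simp [PySem.List.pyRange_one_eq_nil]
  | succ m ih =>
    rw [show ((m + 1 : Nat) : Int) = (m : Int) + 1 by push_cast; ring,
        PySem.List.pyRange_one_succ_right (by positivity), List.foldl_append, ih]
    rw [show c + ((m : Int) + 1) = (c + m) + 1 by ring,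
        PySem.List.pyRange_one_succ_right (by omega)]
    simp only [List.foldl_cons, List.foldl_nil, List.map_append, List.map_cons, List.map_nil, List.append_assoc]
    refine Prod.ext ?_ ?_ <;> simp [pvG, PySem.Str.pyGet?]

lemma pv_outer_fold (s : String) (C : Nat) (r : Nat) (res : List (List Int)) (c : Int) :
    (PySem.List.pyRange 0 (r : Int) 1).foldl
      (fun (st : List (List Int) × Int) _i =>
        let inner :=
          (PySem.List.pyRange 0 (C : Int) 1).foldl
            (fun (st2 : List Int × Int) _j =>
              (st2.1 ++ [(pvMapping.get? ((PySem.Str.pyGet? s st2.2).getD ' ')).getD 0],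
               st2.2 + 1))
            ([], st.2)
        (st.1 ++ [inner.1], inner.2))
      (res, c)
    = (res ++ (PySem.List.pyRange 0 (r : Int) 1).map
        (fun i => (PySem.List.pyRange (c + i * C) (c + i * C + C) 1).map (pvG s.toList)),
       c + r * C) := by
  induction r generalizing res c with
  | zero => simp [PySem.List.pyRange_one_eq_nil]
  | succ m ih =>
    rw [show ((m + 1 : Nat) : Int) = (m : Int) + 1 by push_cast; ring,
        PySem.List.pyRange_one_succ_right (by positivity), List.foldl_append, ih]
    simp only [List.foldl_cons, List.foldl_nil, pv_inner_fold, List.map_append,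
      List.map_cons, List.map_nil, List.append_assoc]
    refine Prod.ext ?_ ?_ <;> simp
    ring_nf

lemma pv_row_eq (s : List Char) (C i : Nat) (hn : i * C + C ≤ s.length) :
    ((s.drop (i * C)).take C).map (fun ch => (pvMapping.get? ch).getD 0)
    = (PySem.List.pyRange ((i * C : Nat) : Int) (((i * C : Nat) : Int) + ((C : Nat) : Int)) 1).map (pvG s) := by
  rw [show ((i * C : Nat) : Int) + ((C : Nat) : Int) = (((i * C + C : Nat)) : Int) by push_cast; ring]
  apply List.ext_getElem
  · simp [PySem.List.length_pyRange_one]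
    omega
  · intro k h1 h2
    simp only [List.getElem_map, PySem.List.getElem_pyRange_one]
    have hk : k < C := by simpa [PySem.List.length_pyRange_one] using h2
    have hik : i * C + k < s.length := by omega
    rw [List.getElem_take, List.getElem_drop]
    simp only [pvG]
    rw [show ((i * C : Nat) : Int) + (k : Int) = ((i * C + k : Nat) : Int) by push_cast; ring,
        PySem.List.pyGet?_natCast, List.getElem?_eq_getElem hik]
    rfl

-- ===== VERDICT (by name: the statement is the Claim_ definition above) =====
theorem convert_dna_to_decimal_matrix_spec : Claim_equal_convert_dna_to_decimal_matrix := by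
  intro string col _hdom hpre
  obtain ⟨hcol, _hchars⟩ := hpre
  unfold Spec_convert_dna_to_decimal_matrix
  unfold convert_dna_to_decimal_matrix convert_dna_to_decimal_matrix_alt
  simp only [PySem.Str.len_eq]
  set s := string.toList with hs
  set n : Int := (s.length : Int) with hn
  set row : Int := PySem.Int.floordiv n col with hrow
  by_cases hcpos : 0 < col
  · have hediv : row = n / col := by rw [hrow, PySem.Int.floordiv_eq_ediv_of_pos hcpos]
    have hrow0 : 0 ≤ row := by rw [hediv]; exact Int.ediv_nonneg (by positivity) (by omega)
    have hrc : row * col ≤ n := by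
      have h1 := PySem.Int.floordiv_mul_add_mod n col
      have h2 := PySem.Int.mod_nonneg n (b := col) hcpos
      rw [← hrow] at h1
      omega
    set R := row.toNat with hR
    set C := col.toNat with hC
    have hrowR : row = ((R : Nat) : Int) := by omega
    have hcC : col = ((C : Nat) : Int) := by omega
    rw [hrowR, hcC, pv_outer_fold]
    simp only [zero_add, List.nil_append]
    apply List.map_congr_left
    intro i hi
    have hiR : 0 ≤ i ∧ i < ((R : Nat) : Int) := by
      simpa [PySem.List.mem_pyRange_one] using hi
    obtain ⟨hi0, hiR⟩ := hiR
    set j : Nat := i.toNat with hj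
    have hij : i = ((j : Nat) : Int) := by omega
    have hjR : j < R := by omega
    have hbound : j * C + C ≤ s.length := by
      have h1 : ((j : Int) + 1) * col ≤ row * col :=
        mul_le_mul_of_nonneg_right (by omega) (by omega)
      rw [hcC] at h1
      have h2 : ((j * C + C : Nat) : Int) ≤ n := by push_cast at h1 ⊢; nlinarith [hrc, hcC]
      omega
    rw [hij]
    rw [show ((j : Nat) : Int) * ((C : Nat) : Int) = ((j * C : Nat) : Int) by push_cast; ring,
        show (((j : Nat) : Int) + 1) * ((C : Nat) : Int) = ((j * C : Nat) : Int) + ((C : Nat) : Int) by push_cast; ring]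
    rw [show (PySem.Str.slice string (some ((j * C : Nat) : Int)) (some (((j * C : Nat) : Int) + ((C : Nat) : Int)))).toList
          = PySem.List.slice s (some ((j * C : Nat) : Int)) (some (((j * C : Nat) : Int) + ((C : Nat) : Int))) by
        simp [PySem.Str.slice, hs]]
    rw [PySem.List.slice_natCast_add]
    exact (pv_row_eq s C j hbound).symm
  · have hcneg : col < 0 := by omega
    have hrow0 : row ≤ 0 := by
      by_contra h
      have hq : 0 < row := by omega
      have h1 := PySem.Int.floordiv_mul_add_mod n col
      rw [← hrow] at h1
      have h2 := (PySem.Int.mod_neg_bounds n (b := col) hcneg).2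
      have h3 : row * col < 0 := mul_neg_of_pos_of_neg hq hcneg
      have hn0 : (0:Int) ≤ n := by positivity
      omega
    rw [show (PySem.List.pyRange 0 row 1) = [] from PySem.List.pyRange_one_eq_nil (by omega)]
    simp
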